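-- pv_equiv track=rewrite | github.com/Escaper2/ITMO-Algorithms-Labs | 1 семестр/lab4/4F.  Гирлянда/gir.py | girland
-- ===== SOURCE A (Python) =====
-- def girland(numberOfLamps, heightOfFirstlamp, mid):
--     garland = [heightOfFirstlamp, mid]
--     for numberOfLamps in range(2, numberOfLamps):
--         lampHeight = formula(garland[numberOfLamps - 2], garland[numberOfLamps - 1])
--         if lampHeight < 0:
--             return None
--         garland.append(lampHeight)
--
--     return garland
--
-- def formula(firstHeight, secondHeight):
--     return 2 * secondHeight - firstHeight + 2
-- ===== SOURCE B (Python) =====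
-- def girland(numberOfLamps, heightOfFirstlamp, mid):
--     count = 2 if numberOfLamps < 2 else numberOfLamps
--     d = mid - heightOfFirstlamp
--     if any(i * i + (d - 1) * i + heightOfFirstlamp < 0 for i in range(2, count)):
--         return None
--     return [heightOfFirstlamp + i * d + i * (i - 1) for i in range(count)]
-- ===== Notes on version B (the rewrite author's own statement) =====
-- stated objective: simpler
-- what changed: Replaces the two-predecessor recurrence loop with appends and an in-loop early return by a closed-form comprehension g[i] = h + i*(mid-h) + i*(i-1) over range(max(n,2)) plus a separate negativity pass over indices >= 2.
import Mathlib
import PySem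

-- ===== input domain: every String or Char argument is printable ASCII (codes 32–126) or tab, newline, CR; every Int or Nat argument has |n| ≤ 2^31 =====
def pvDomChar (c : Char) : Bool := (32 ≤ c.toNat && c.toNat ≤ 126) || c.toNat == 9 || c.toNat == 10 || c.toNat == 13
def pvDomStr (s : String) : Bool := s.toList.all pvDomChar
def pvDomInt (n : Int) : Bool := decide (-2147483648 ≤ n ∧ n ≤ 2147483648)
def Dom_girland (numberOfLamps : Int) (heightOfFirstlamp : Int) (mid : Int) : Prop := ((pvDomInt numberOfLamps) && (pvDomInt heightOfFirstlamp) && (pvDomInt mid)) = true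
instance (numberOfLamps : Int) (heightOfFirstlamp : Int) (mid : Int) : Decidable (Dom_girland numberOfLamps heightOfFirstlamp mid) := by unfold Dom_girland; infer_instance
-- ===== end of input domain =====

-- B replaces A's two-predecessor recurrence loop by the closed form g[i] = h + i*(mid-h) + i*(i-1):
-- a short-circuiting negativity check over indices ≥ 2 first, then one comprehension (objective: simpler).

-- ===== PORT A =====
def pvFormula (firstHeight : Int) (secondHeight : Int) : Int :=
  2 * secondHeight - firstHeight + 2

-- the for-loop of A; the indices k-2, k-1 are always in range (len garland = k), so pyGetD 0 is exact
def girlandGo (garland : List Int) : List Int → Option (List Int)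
  | [] => some garland
  | k :: ks =>
    let lampHeight := pvFormula (PySem.List.pyGetD garland (k - 2) 0) (PySem.List.pyGetD garland (k - 1) 0)
    if lampHeight < 0 then none
    else girlandGo (garland ++ [lampHeight]) ks

def girland (numberOfLamps : Int) (heightOfFirstlamp : Int) (mid : Int) : Option (List Int) :=
  girlandGo [heightOfFirstlamp, mid] (PySem.List.pyRange 2 numberOfLamps 1)

-- ===== PORT B =====
def pvClf (h : Int) (m : Int) (i : Int) : Int := h + i * (m - h) + i * (i - 1)

def girland_alt (numberOfLamps : Int) (heightOfFirstlamp : Int) (mid : Int) : Option (List Int) :=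
  let count := if numberOfLamps < 2 then 2 else numberOfLamps
  let d := mid - heightOfFirstlamp
  if (PySem.List.pyRange 2 count 1).any
      (fun i => decide (i * i + (d - 1) * i + heightOfFirstlamp < 0)) then none
  else some ((PySem.List.pyRange 0 count 1).map (pvClf heightOfFirstlamp mid))

-- ===== PRECONDITION & SPEC =====
def Spec_girland (numberOfLamps : Int) (heightOfFirstlamp : Int) (mid : Int) (out : Option (List Int)) : Prop := out = girland_alt numberOfLamps heightOfFirstlamp mid
instance (numberOfLamps : Int) (heightOfFirstlamp : Int) (mid : Int) (out : Option (List Int)) : Decidable (Spec_girland numberOfLamps heightOfFirstlamp mid out) := by unfold Spec_girland; infer_instance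

-- ===== CLAIM (what is proved, stated in full; the proofs are below) =====
def Claim_equal_girland : Prop := ∀ (numberOfLamps : Int) (heightOfFirstlamp : Int) (mid : Int), Dom_girland numberOfLamps heightOfFirstlamp mid → Spec_girland numberOfLamps heightOfFirstlamp mid (girland numberOfLamps heightOfFirstlamp mid)

-- ===== LEMMAS AND PROOFS =====

-- the recurrence step reproduces the closed form
theorem pvClf_step (h m k : Int) :
    pvFormula (pvClf h m (k - 2)) (pvClf h m (k - 1)) = pvClf h m k := by
  unfold pvFormula pvClf; ring

theorem pvClf_zero (h m : Int) : pvClf h m 0 = h := by unfold pvClf; ring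
theorem pvClf_one (h m : Int) : pvClf h m 1 = m := by unfold pvClf; ring

theorem girlandGo_inv (h m : Int) : ∀ (fuel : Nat) (k n : Int), 2 ≤ k → n - k = (fuel : Int) →
    girlandGo ((PySem.List.pyRange 0 k 1).map (pvClf h m)) (PySem.List.pyRange k n 1) =
      if ((PySem.List.pyRange k n 1).map (pvClf h m)).any (fun x => decide (x < 0)) then none
      else some ((PySem.List.pyRange 0 n 1).map (pvClf h m)) := by
  intro fuel
  induction fuel with
  | zero =>
    intro k n hk hn
    have hnk : n = k := by omega
    rw [hnk, PySem.List.pyRange_one_eq_nil (le_refl k)]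
    simp [girlandGo]
  | succ f ih =>
    intro k n hk hn
    have hkn : k < n := by omega
    rw [PySem.List.pyRange_one_cons hkn]
    have hg2 : PySem.List.pyGetD ((PySem.List.pyRange 0 k 1).map (pvClf h m)) (k - 2) 0 = pvClf h m (k - 2) :=
      PySem.List.pyGetD_map_pyRange_of_nonneg _ _ _ _ (by omega) (by omega)
    have hg1 : PySem.List.pyGetD ((PySem.List.pyRange 0 k 1).map (pvClf h m)) (k - 1) 0 = pvClf h m (k - 1) :=
      PySem.List.pyGetD_map_pyRange_of_nonneg _ _ _ _ (by omega) (by omega)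
    show (if pvFormula _ _ < 0 then none else _) = _
    rw [hg2, hg1, pvClf_step]
    by_cases hneg : pvClf h m k < 0
    · simp [hneg]
    · have happ : (PySem.List.pyRange 0 k 1).map (pvClf h m) ++ [pvClf h m k] =
          (PySem.List.pyRange 0 (k + 1) 1).map (pvClf h m) := by
        rw [PySem.List.pyRange_one_succ_right (by omega : (0:Int) ≤ k)]
        simp
      simp only [hneg, if_false, List.map_cons, List.any_cons]
      rw [happ, ih (k + 1) n (by omega) (by omega)]
      rfl

theorem pyRange_zero_two : PySem.List.pyRange 0 2 1 = [0, 1] := by decide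

theorem girland_eq_alt (n h m : Int) : girland n h m = girland_alt n h m := by
  unfold girland girland_alt
  by_cases hn : n < 2
  · rw [PySem.List.pyRange_one_eq_nil (by omega : n ≤ 2)]
    simp [girlandGo, hn, pyRange_zero_two, pvClf_zero, pvClf_one]
  · have hbase : [h, m] = (PySem.List.pyRange 0 2 1).map (pvClf h m) := by
      rw [pyRange_zero_two]; simp [pvClf_zero, pvClf_one]
    have hpred : (fun i => decide (i * i + (m - h - 1) * i + h < 0)) =
        (fun i => decide (pvClf h m i < 0)) := by
      funext i
      have : i * i + (m - h - 1) * i + h = pvClf h m i := by unfold pvClf; ring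
      rw [this]
    rw [hbase, girlandGo_inv h m (n - 2).toNat 2 n (le_refl 2) (by omega)]
    simp only [hn, if_false, hpred, List.any_map]
    rfl

-- ===== VERDICT (by name: the statement is the Claim_ definition above) =====
theorem girland_spec : Claim_equal_girland := by
  intro n h m _
  show girland n h m = girland_alt n h m
  exact girland_eq_alt n h m
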